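-- pv_equiv track=rewrite | github.com/Lukasz1928/NLP | lab9/src/frequencies.py | to_coarse_classes
-- ===== SOURCE A (Python) =====
-- def merge_freqs(d1, d2):
--     s1 = {k: v for (k, v) in d1}
--     s2 = {k: v for (k, v) in d2}
--     s12 = {k: 0 for k in list(s1.keys()) + list(s2.keys())}
--     for k, v in d1:
--         s12[k] += v
--     for k, v in d2:
--         s12[k] += v
--     return [(k, v) for k, v in s12.items()]
--
-- def to_coarse_classes(ewf):
--     f = {}
--     for k, v in ewf.items():
--         coarse_key = '_'.join(k[0].split('_')[:2])
--         if coarse_key in f.keys():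
--             f[coarse_key] = merge_freqs(f[coarse_key], v)
--         else:
--             f[coarse_key] = v
--     return f
-- ===== SOURCE B (Python) =====
-- def to_coarse_classes(ewf):
--     # One pass grouping, then one counting pass per merged group
--     # (instead of repeated pairwise dict-rebuilding merges).
--     groups = {}
--     for k, v in ewf.items():
--         ck = '_'.join(k[0].split('_')[:2])
--         groups[ck] = groups.get(ck, []) + [v]
--     result = {}
--     for ck, vs in groups.items():
--         if len(vs) == 1:
--             result[ck] = vs[0]
--         else:
--             acc = {}
--             for v in vs:
--                 for w, c in v:
--                     acc[w] = acc.get(w, 0) + c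
--             result[ck] = list(acc.items())
--     return result
-- ===== Notes on version B (the rewrite author's own statement) =====
-- stated objective: faster
-- what changed: Instead of re-running merge_freqs (which rebuilds three dicts over the whole accumulated list) on every coarse-key collision, B collects each coarse key's frequency lists in one grouping pass and then merges each group with a single ordered-dict counting pass, preserving first-occurrence order.
import Mathlib
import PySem

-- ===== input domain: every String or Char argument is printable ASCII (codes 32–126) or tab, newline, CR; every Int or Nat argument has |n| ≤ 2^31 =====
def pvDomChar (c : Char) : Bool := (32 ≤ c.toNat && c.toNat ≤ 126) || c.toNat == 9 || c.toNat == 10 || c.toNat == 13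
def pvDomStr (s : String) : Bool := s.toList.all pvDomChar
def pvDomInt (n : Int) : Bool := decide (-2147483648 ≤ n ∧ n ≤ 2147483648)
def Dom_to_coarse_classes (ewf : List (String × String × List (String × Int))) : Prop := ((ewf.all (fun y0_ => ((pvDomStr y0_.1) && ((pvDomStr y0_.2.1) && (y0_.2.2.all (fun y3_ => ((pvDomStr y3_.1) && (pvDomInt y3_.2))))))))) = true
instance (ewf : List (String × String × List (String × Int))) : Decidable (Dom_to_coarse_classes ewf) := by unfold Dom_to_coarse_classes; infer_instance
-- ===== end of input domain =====

-- B groups all frequency lists per coarse key in one pass and merges each group with a single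
-- counting pass, instead of A's repeated pairwise dict-rebuilding merges (objective: faster).

-- ===== PORT A =====

-- '_'.join(k[0].split('_')[:2]) — shared subexpression of both Pythons
def pvCoarse (k1 : String) : String :=
  PySem.Str.join "_" (PySem.List.slice ((PySem.Str.split? k1 "_").getD []) none (some 2))

-- literal port of merge_freqs; s12[k] += v is ported as modify with default 0, exact because
-- every key of d1/d2 was pre-inserted into s12
def pvMergeFreqs (d1 d2 : List (String × Int)) : List (String × Int) :=
  let s1 : PySem.Dict String Int := d1.foldl (fun d p => d.insert p.1 p.2) PySem.Dict.empty
  let s2 : PySem.Dict String Int := d2.foldl (fun d p => d.insert p.1 p.2) PySem.Dict.empty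
  let s12 : PySem.Dict String Int := (s1.keys ++ s2.keys).foldl (fun d k => d.insert k 0) PySem.Dict.empty
  let s12a := d1.foldl (fun d p => d.modify p.1 0 (· + p.2)) s12
  let s12b := d2.foldl (fun d p => d.modify p.1 0 (· + p.2)) s12a
  s12b.items

def to_coarse_classes (ewf : List (String × String × List (String × Int))) : List (String × List (String × Int)) :=
  (ewf.foldl (fun (f : PySem.Dict String (List (String × Int))) e =>
      let ck := pvCoarse e.1
      if f.contains ck then f.insert ck (pvMergeFreqs (f.getD ck []) e.2.2)
      else f.insert ck e.2.2)
    PySem.Dict.empty).items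

-- ===== PORT B =====
def to_coarse_classes_alt (ewf : List (String × String × List (String × Int))) : List (String × List (String × Int)) :=
  let groups : PySem.Dict String (List (List (String × Int))) :=
    ewf.foldl (fun g e => g.insert (pvCoarse e.1) (g.getD (pvCoarse e.1) [] ++ [e.2.2]))
      PySem.Dict.empty
  let result : PySem.Dict String (List (String × Int)) :=
    groups.items.foldl (fun r p =>
        if p.2.length = 1 then r.insert p.1 (p.2.headD [])
        else r.insert p.1
          ((p.2.foldl (fun a v => v.foldl (fun a wc => a.insert wc.1 (a.getD wc.1 0 + wc.2)) a)
              PySem.Dict.empty).items))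
      PySem.Dict.empty
  result.items

-- ===== PRECONDITION & SPEC =====
def Spec_to_coarse_classes (ewf : List (String × String × List (String × Int))) (out : List (String × List (String × Int))) : Prop := out = to_coarse_classes_alt ewf
instance (ewf : List (String × String × List (String × Int))) (out : List (String × List (String × Int))) : Decidable (Spec_to_coarse_classes ewf out) := by unfold Spec_to_coarse_classes; infer_instance

-- ===== CLAIM (what is proved, stated in full; the proofs are below) =====
def Claim_equal_to_coarse_classes : Prop := ∀ (ewf : List (String × String × List (String × Int))), Dom_to_coarse_classes ewf → Spec_to_coarse_classes ewf (to_coarse_classes ewf)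

-- ===== LEMMAS AND PROOFS =====


theorem pvAdd_of_mem {s : PySem.Set String} {x : String} (h : x ∈ s) : s.add x = s := by
  simp [PySem.Set.add, PySem.Set.contains]; exact h

theorem pvAdd_of_not_mem {s : PySem.Set String} {x : String} (h : x ∉ s) : s.add x = s ++ [x] := by
  simp [PySem.Set.add, PySem.Set.contains]; intro hc; exact absurd hc h

theorem pvUpdate_cons (s : PySem.Set String) (x : String) (l : List String) :
    PySem.Set.update s (x :: l) = PySem.Set.update (s.add x) l := rfl

theorem pvUpdate_eq (l : List String) : ∀ s : PySem.Set String,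
    PySem.Set.update s l = s ++ (PySem.Set.ofList l).filter (fun x => decide (x ∉ s)) := by
  induction l with
  | nil => intro s; simp [PySem.Set.update, PySem.Set.ofList, PySem.Set.empty]
  | cons x l ih =>
    intro s
    have hofl : PySem.Set.ofList (x :: l) =
        [x] ++ (PySem.Set.ofList l).filter (fun y => decide (y ∉ ([x] : List String))) := by
      have h0 : PySem.Set.ofList (x :: l) = PySem.Set.update (PySem.Set.add PySem.Set.empty x) l := rfl
      have h1 : PySem.Set.add PySem.Set.empty x = [x] := by
        simp [PySem.Set.add, PySem.Set.empty, PySem.Set.contains]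
      rw [h0, h1, ih]
    rw [pvUpdate_cons, ih]
    by_cases hx : x ∈ s
    · rw [pvAdd_of_mem hx, hofl]
      simp only [List.filter_append, List.filter_filter]
      have : List.filter (fun y => decide (y ∉ s)) [x] = [] := by simp [hx]
      rw [this]
      simp only [List.nil_append]
      congr 1
      apply List.filter_congr
      intro y _
      by_cases hy : y = x
      · subst hy; simp [hx]
      · simp [hy]
    · rw [pvAdd_of_not_mem hx, hofl]
      simp only [List.filter_append, List.filter_filter]
      have : List.filter (fun y => decide (y ∉ s)) [x] = [x] := by simp [hx]
      rw [this]
      have h2 : List.filter (fun x_1 => decide (x_1 ∉ s ++ [x])) (PySem.Set.ofList l)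
          = List.filter (fun a => decide (a ∉ ([x]:List String)) && decide (a ∉ s)) (PySem.Set.ofList l) := by
        apply List.filter_congr
        intro y _
        by_cases hy : y = x
        · subst hy; simp
        · by_cases hys : y ∈ s <;> simp [hy, hys]
      rw [h2]
      simp only [List.append_assoc]
      congr 2
      exact List.filter_congr (fun a _ => Bool.and_comm _ _)

theorem pvMem_update {s : PySem.Set String} {l : List String} {x : String} :
    x ∈ PySem.Set.update s l ↔ x ∈ s ∨ x ∈ l := by
  rw [pvUpdate_eq]
  simp [List.mem_filter, PySem.Set.mem_ofList]
  constructor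
  · rintro (h | ⟨h, _⟩) <;> [exact Or.inl h; exact Or.inr h]
  · rintro (h | h)
    · exact Or.inl h
    · by_cases hs : x ∈ s
      · exact Or.inl hs
      · exact Or.inr ⟨h, hs⟩

theorem pvUpdate_of_subset {s : PySem.Set String} {l : List String} (h : ∀ x ∈ l, x ∈ s) :
    PySem.Set.update s l = s := by
  rw [pvUpdate_eq]
  have : List.filter (fun x => decide (x ∉ s)) (PySem.Set.ofList l) = [] := by
    rw [List.filter_eq_nil_iff]
    intro a ha
    simp only [decide_not, Bool.not_eq_true', decide_eq_false_iff_not, not_not]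
    exact h a ((PySem.Set.mem_ofList l a).1 ha)
  rw [this, List.append_nil]

theorem pvOfList_idem (l : List String) : PySem.Set.ofList (PySem.Set.ofList l) = PySem.Set.ofList l := by
  have h : PySem.Set.ofList (PySem.Set.ofList l) = PySem.Set.update PySem.Set.empty (PySem.Set.ofList l) := rfl
  rw [h, PySem.Set.update_eq_append_of_disjoint _ _ (PySem.Set.nodup_ofList l) (by simp [PySem.Set.empty])]
  simp [PySem.Set.empty]

theorem pvUpdate_ofList (s : PySem.Set String) (l : List String) :
    PySem.Set.update s (PySem.Set.ofList l) = PySem.Set.update s l := by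
  rw [pvUpdate_eq, pvUpdate_eq, pvOfList_idem]

def pvAccStep (a : PySem.Dict String Int) (wc : String × Int) : PySem.Dict String Int :=
  a.insert wc.1 (a.getD wc.1 0 + wc.2)

def pvAcc (d : PySem.Dict String Int) (l : List (String × Int)) : PySem.Dict String Int :=
  l.foldl pvAccStep d

-- A's += loop is pvAcc (modify unfolds to insert of getD + v)
theorem pvAcc_getD (l : List (String × Int)) : ∀ (d : PySem.Dict String Int) (k : String),
    (pvAcc d l).getD k 0 = d.getD k 0 + ((l.filter (fun p => p.1 = k)).map (·.2)).sum := by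
  induction l with
  | nil => intro d k; simp [pvAcc]
  | cons p l ih =>
    intro d k
    have h : pvAcc d (p :: l) = pvAcc (pvAccStep d p) l := rfl
    rw [h, ih]
    by_cases hk : p.1 = k
    · simp [pvAccStep, hk]
      ring
    · simp [pvAccStep, PySem.Dict.getD_insert, hk, Ne.symm hk]

theorem pvAcc_keys (l : List (String × Int)) (d : PySem.Dict String Int) :
    (pvAcc d l).keys = PySem.Set.update d.keys (l.map (·.1)) :=
  PySem.Dict.keys_foldl_insert_key l (·.1) (fun d p => d.getD p.1 0 + p.2) d

theorem pvAcc_nodup (l : List (String × Int)) (d : PySem.Dict String Int) (h : d.keys.Nodup) :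
    (pvAcc d l).keys.Nodup :=
  PySem.Dict.nodup_keys_foldl_insert_key l (·.1) (fun d p => d.getD p.1 0 + p.2) d h

-- the s12 initialisation: every value is 0
theorem pvZeroLoop_getD (L : List String) : ∀ (d : PySem.Dict String Int),
    (∀ k, d.getD k 0 = 0) → ∀ k, (L.foldl (fun d k => d.insert k 0) d).getD k 0 = 0 := by
  induction L with
  | nil => intro d h k; exact h k
  | cons x L ih =>
    intro d h k
    refine ih _ (fun k' => ?_) k
    rw [PySem.Dict.getD_insert]
    split <;> [rfl; exact h k']

theorem pvZeroLoop_keys (L : List String) (d : PySem.Dict String Int) :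
    (L.foldl (fun d k => d.insert k 0) d).keys = PySem.Set.update d.keys L := by
  have := PySem.Dict.keys_foldl_insert_key L id (fun _ _ => (0:Int)) d
  simpa using this

theorem pvInsLoop_keys (l : List (String × Int)) (d : PySem.Dict String Int) :
    (l.foldl (fun d p => d.insert p.1 p.2) d).keys = PySem.Set.update d.keys (l.map (·.1)) :=
  PySem.Dict.keys_foldl_insert_key l (·.1) (fun _ p => p.2) d

-- merge_freqs d1 d2 is exactly one counting pass over d1 ++ d2
theorem pvMergeFreqs_eq_acc (d1 d2 : List (String × Int)) :
    pvMergeFreqs d1 d2 = (pvAcc PySem.Dict.empty (d1 ++ d2)).items := by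
  show (pvAcc (pvAcc ((((d1.foldl (fun d p => d.insert p.1 p.2) PySem.Dict.empty).keys ++ (d2.foldl (fun d p => d.insert p.1 p.2) PySem.Dict.empty).keys).foldl (fun d k => d.insert k 0) PySem.Dict.empty)) d1) d2).items = _
  have hnil : (PySem.Dict.empty : PySem.Dict String Int).keys = ([] : List String) := by
    simp [PySem.Dict.empty, PySem.Dict.keys]
  -- keys equality
  have hkeys : (pvAcc (pvAcc ((((d1.foldl (fun d p => d.insert p.1 p.2) PySem.Dict.empty).keys ++ (d2.foldl (fun d p => d.insert p.1 p.2) PySem.Dict.empty).keys).foldl (fun d k => d.insert k 0) PySem.Dict.empty)) d1) d2).keys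
      = (pvAcc PySem.Dict.empty (d1 ++ d2)).keys := by
    rw [pvAcc_keys, pvAcc_keys, pvZeroLoop_keys, pvInsLoop_keys, pvInsLoop_keys, pvAcc_keys, hnil]
    set a := d1.map (·.1)
    set b := d2.map (·.1)
    have hofl : ∀ L : List String, PySem.Set.update ([] : PySem.Set String) L = PySem.Set.ofList L := fun _ => rfl
    rw [hofl, hofl, hofl]
    have h1 : PySem.Set.ofList (PySem.Set.ofList a ++ PySem.Set.ofList b)
        = PySem.Set.update (PySem.Set.ofList a) b := by
      have : PySem.Set.ofList (PySem.Set.ofList a ++ PySem.Set.ofList b)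
          = PySem.Set.update (PySem.Set.ofList (PySem.Set.ofList a)) (PySem.Set.ofList b) := by
        show PySem.Set.update PySem.Set.empty _ = _
        rw [PySem.Set.update]
        rw [List.foldl_append]
        rfl
      rw [this, pvOfList_idem, pvUpdate_ofList]
    rw [h1]
    have h2 : PySem.Set.update (PySem.Set.update (PySem.Set.ofList a) b) a
        = PySem.Set.update (PySem.Set.ofList a) b := by
      apply pvUpdate_of_subset
      intro x hx
      exact pvMem_update.2 (Or.inl ((PySem.Set.mem_ofList a x).2 hx))
    rw [h2]
    have h3 : PySem.Set.update (PySem.Set.update (PySem.Set.ofList a) b) b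
        = PySem.Set.update (PySem.Set.ofList a) b := by
      apply pvUpdate_of_subset
      intro x hx
      exact pvMem_update.2 (Or.inr hx)
    rw [h3]
    rw [List.map_append]
    show PySem.Set.update (PySem.Set.ofList a) b = PySem.Set.update ([] : PySem.Set String) (a ++ b)
    rw [show PySem.Set.update ([] : PySem.Set String) (a ++ b)
          = List.foldl PySem.Set.add (List.foldl PySem.Set.add ([] : PySem.Set String) a) b from by
        rw [PySem.Set.update, List.foldl_append]]
    rfl
  have hndE : (PySem.Dict.empty : PySem.Dict String Int).keys.Nodup := by
    rw [hnil]; exact List.nodup_nil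
  have hndZ : ((((d1.foldl (fun d p => d.insert p.1 p.2) PySem.Dict.empty).keys ++ (d2.foldl (fun d p => d.insert p.1 p.2) PySem.Dict.empty).keys).foldl (fun d k => d.insert k 0) PySem.Dict.empty) : PySem.Dict String Int).keys.Nodup := by
    have := PySem.Dict.nodup_keys_foldl_insert_key ((d1.foldl (fun d p => d.insert p.1 p.2) PySem.Dict.empty).keys ++ (d2.foldl (fun d p => d.insert p.1 p.2) PySem.Dict.empty).keys) id (fun _ _ => (0:Int)) PySem.Dict.empty hndE
    simpa using this
  have hndL := pvAcc_nodup d2 _ (pvAcc_nodup d1 _ hndZ)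
  have hndR := pvAcc_nodup (d1 ++ d2) _ hndE
  have hgetD : ∀ k, (pvAcc (pvAcc ((((d1.foldl (fun d p => d.insert p.1 p.2) PySem.Dict.empty).keys ++ (d2.foldl (fun d p => d.insert p.1 p.2) PySem.Dict.empty).keys).foldl (fun d k => d.insert k 0) PySem.Dict.empty)) d1) d2).getD k 0
      = (pvAcc PySem.Dict.empty (d1 ++ d2)).getD k 0 := by
    intro k
    rw [pvAcc_getD, pvAcc_getD, pvAcc_getD]
    rw [pvZeroLoop_getD _ _ (fun k' => by simp [PySem.Dict.getD_empty]) k]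
    rw [PySem.Dict.getD_empty]
    rw [List.filter_append, List.map_append, List.sum_append]
    ring
  rw [PySem.Dict.items_eq_map_keys _ hndL 0, PySem.Dict.items_eq_map_keys _ hndR 0, hkeys]
  exact List.map_congr_left (fun k _ => by rw [hgetD k])

-- A's accumulated value for a coarse group, as the list of the group's frequency lists
def pvMergeA : List (List (String × Int)) → List (String × Int)
  | [] => []
  | v :: vs => vs.foldl (fun acc w => pvMergeFreqs acc w) v

theorem pvAcc_rebuild (l : List (String × Int)) : ∀ d : PySem.Dict String Int,
    (l.map (·.1)).Nodup → (∀ p ∈ l, d.contains p.1 = false) →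
    pvAcc d l = PySem.Dict.mk (d.items ++ l) := by
  induction l with
  | nil => intro d _ _; show d = _; cases d with | mk items => simp
  | cons p l ih =>
    intro d hnd hc
    have hcp : d.contains p.1 = false := hc p (by simp)
    have h0 : pvAcc d (p :: l) = pvAcc (d.insert p.1 (d.getD p.1 0 + p.2)) l := rfl
    rw [h0, PySem.Dict.getD_of_not_contains d 0 hcp, zero_add]
    rw [ih _ (by simpa using hnd.sublist ((List.sublist_cons_self p l).map (·.1))) ?hc]
    · rw [PySem.Dict.items_insert_of_not_contains d p.2 hcp]
      simp
    case hc =>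
      intro q hq
      rw [PySem.Dict.contains_insert]
      have hne : q.1 ≠ p.1 := by
        simp only [List.map_cons, List.nodup_cons] at hnd
        exact fun h => hnd.1 (h ▸ List.mem_map_of_mem hq)
      simp [hne, hc q (List.mem_cons_of_mem p hq)]

theorem pvAcc_empty_items (x : List (String × Int)) :
    pvAcc PySem.Dict.empty (pvAcc PySem.Dict.empty x).items = pvAcc PySem.Dict.empty x := by
  have hnd : ((pvAcc PySem.Dict.empty x).items.map (·.1)).Nodup := by
    have := pvAcc_nodup x PySem.Dict.empty (by simp [PySem.Dict.empty, PySem.Dict.keys])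
    simpa [PySem.Dict.keys] using this
  rw [pvAcc_rebuild _ _ hnd (fun q _ => by simp [PySem.Dict.empty, PySem.Dict.contains])]
  show PySem.Dict.mk ((PySem.Dict.empty : PySem.Dict String Int).items ++ _) = _
  cases h : pvAcc PySem.Dict.empty x with | mk items => simp [PySem.Dict.empty]

theorem pvAcc_append (x y : List (String × Int)) (d : PySem.Dict String Int) :
    pvAcc d (x ++ y) = pvAcc (pvAcc d x) y := by
  simp [pvAcc, List.foldl_append]

theorem pvAcc_items_append (x y : List (String × Int)) :
    pvAcc PySem.Dict.empty ((pvAcc PySem.Dict.empty x).items ++ y)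
      = pvAcc PySem.Dict.empty (x ++ y) := by
  rw [pvAcc_append, pvAcc_empty_items, pvAcc_append]

theorem pvMergeA_concat (v1 v : List (String × Int)) (vs : List (List (String × Int))) :
    pvMergeA ((v1 :: vs) ++ [v]) = pvMergeFreqs (pvMergeA (v1 :: vs)) v := by
  show (vs ++ [v]).foldl (fun acc w => pvMergeFreqs acc w) v1 = _
  rw [List.foldl_append]
  rfl

theorem pvMergeA_eq_acc : ∀ (vs : List (List (String × Int))), vs ≠ [] → ∀ (v1 : List (String × Int)),
    pvMergeA (v1 :: vs) = (pvAcc PySem.Dict.empty (v1 ++ vs.flatten)).items := by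
  intro vs
  induction vs with
  | nil => intro h; exact absurd rfl h
  | cons v2 vs ih =>
    intro _ v1
    by_cases hvs : vs = []
    · subst hvs
      show pvMergeFreqs v1 v2 = _
      rw [pvMergeFreqs_eq_acc]
      simp
    · have h1 : pvMergeA (v1 :: v2 :: vs) = pvMergeA (pvMergeFreqs v1 v2 :: vs) := rfl
      rw [h1, ih hvs, pvMergeFreqs_eq_acc, pvAcc_items_append]
      simp [List.append_assoc]

theorem pvDouble (vs : List (List (String × Int))) : ∀ a : PySem.Dict String Int,
    vs.foldl (fun a v => v.foldl pvAccStep a) a = pvAcc a vs.flatten := by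
  induction vs with
  | nil => intro a; rfl
  | cons v vs ih =>
    intro a
    show vs.foldl _ (v.foldl pvAccStep a) = _
    rw [ih, List.flatten_cons, pvAcc_append]
    rfl

def pvStepA (f : PySem.Dict String (List (String × Int))) (e : String × String × List (String × Int)) :
    PySem.Dict String (List (String × Int)) :=
  let ck := pvCoarse e.1
  if f.contains ck then f.insert ck (pvMergeFreqs (f.getD ck []) e.2.2)
  else f.insert ck e.2.2

def pvStepB (g : PySem.Dict String (List (List (String × Int))))
    (e : String × String × List (String × Int)) : PySem.Dict String (List (List (String × Int))) :=
  g.insert (pvCoarse e.1) (g.getD (pvCoarse e.1) [] ++ [e.2.2])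

def pvF (p : String × List (List (String × Int))) : String × List (String × Int) :=
  (p.1, pvMergeA p.2)

set_option maxHeartbeats 1000000 in
theorem pvInv (ewf : List (String × String × List (String × Int))) :
    ∀ (g : PySem.Dict String (List (List (String × Int)))) (f : PySem.Dict String (List (String × Int))),
    f.items = g.items.map pvF → g.keys.Nodup → (∀ p ∈ g.items, p.2 ≠ []) →
    (ewf.foldl pvStepA f).items = (ewf.foldl pvStepB g).items.map pvF
      ∧ (ewf.foldl pvStepB g).keys.Nodup
      ∧ (∀ p ∈ (ewf.foldl pvStepB g).items, p.2 ≠ []) := by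
  induction ewf with
  | nil => intro g f hP hnd hne; exact ⟨hP, hnd, hne⟩
  | cons e rest ih =>
    intro g f hP hnd hne
    have hkeys : f.keys = g.keys := by
      show f.items.map (·.1) = g.items.map (·.1)
      rw [hP, List.map_map]
      rfl
    set c := pvCoarse e.1 with hc
    set v := e.2.2 with hv
    have hcont : f.contains c = g.contains c := by
      rw [PySem.Dict.contains_eq_decide_mem_keys, PySem.Dict.contains_eq_decide_mem_keys, hkeys]
    show (rest.foldl pvStepA (pvStepA f e)).items = (rest.foldl pvStepB (pvStepB g e)).items.map pvF
      ∧ (rest.foldl pvStepB (pvStepB g e)).keys.Nodup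
      ∧ (∀ p ∈ (rest.foldl pvStepB (pvStepB g e)).items, p.2 ≠ [])
    by_cases hg : g.contains c = true
    · -- existing coarse key: A merges, B appends the list
      have hf : f.contains c = true := by rw [hcont]; exact hg
      obtain ⟨w, hw⟩ : ∃ w, g.get? c = some w := by
        have := PySem.Dict.contains_eq_isSome_get? g c
        rw [hg] at this
        exact Option.isSome_iff_exists.1 this.symm
      have hwmem : (c, w) ∈ g.items := PySem.Dict.mem_items_of_get?_eq_some _ hw
      have hwne : w ≠ [] := hne _ hwmem
      have hgetg : g.getD c [] = w := PySem.Dict.getD_of_get?_eq_some _ _ hw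
      have hndf : f.keys.Nodup := by rw [hkeys]; exact hnd
      have hgetf : f.getD c [] = pvMergeA w := by
        have : (c, pvMergeA w) ∈ f.items := by
          rw [hP]
          exact List.mem_map_of_mem hwmem
        exact PySem.Dict.getD_of_mem_items _ this hndf []
      have hstepA : pvStepA f e = f.insert c (pvMergeFreqs (pvMergeA w) v) := by
        show (if f.contains c then f.insert c (pvMergeFreqs (f.getD c []) v) else f.insert c v) = _
        rw [hf, if_pos rfl, hgetf]
      have hstepB : pvStepB g e = g.insert c (w ++ [v]) := by
        show g.insert c (g.getD c [] ++ [v]) = _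
        rw [hgetg]
      rw [hstepA, hstepB]
      apply ih
      · rw [PySem.Dict.items_insert_of_contains _ _ hf, PySem.Dict.items_insert_of_contains _ _ hg,
          hP, List.map_map, List.map_map]
        refine List.map_congr_left (fun p hp => ?_)
        by_cases hpc : p.1 = c
        · have hpw : p.2 = w := by
            have h1 : g.get? p.1 = some p.2 := PySem.Dict.get?_of_mem_items g hp hnd
            rw [hpc, hw] at h1
            exact (Option.some_inj.1 h1).symm
          obtain ⟨w1, ws, hwcons⟩ := List.exists_cons_of_ne_nil hwne
          have hm := pvMergeA_concat w1 v ws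
          rw [← hwcons] at hm
          simp only [Function.comp_apply, pvF, hpc, hpw, beq_self_eq_true, if_pos]
          rw [← hm]
        · simp only [Function.comp_apply, pvF]
          have : (p.1 == c) = false := by simpa using hpc
          simp [this]
      · have := PySem.Dict.keys_insert_of_contains g (w ++ [v]) hg
        rw [this]
        exact hnd
      · intro p hp
        rcases (PySem.Dict.mem_items_insert _ _ _ _).1 hp with h | h
        · rw [h]; simp
        · exact hne p h.1
    · -- fresh coarse key
      have hgf : g.contains c = false := by simpa using hg
      have hff : f.contains c = false := by rw [hcont]; exact hgf
      have hstepA : pvStepA f e = f.insert c v := by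
        show (if f.contains c then f.insert c (pvMergeFreqs (f.getD c []) v) else f.insert c v) = _
        rw [hff]
        simp
      have hstepB : pvStepB g e = g.insert c [v] := by
        show g.insert c (g.getD c [] ++ [v]) = _
        rw [PySem.Dict.getD_of_not_contains g [] hgf]
        rfl
      rw [hstepA, hstepB]
      refine ih _ _ ?_ ?_ ?_
      · rw [PySem.Dict.items_insert_of_not_contains _ _ hff,
          PySem.Dict.items_insert_of_not_contains _ _ hgf, hP, List.map_append]
        rfl
      · rw [PySem.Dict.keys_insert_of_not_contains _ _ hgf]
        have hcmem : c ∉ g.keys := by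
          have := PySem.Dict.contains_eq_decide_mem_keys g c
          rw [hgf] at this
          simpa using this.symm
        rw [List.nodup_append]
        refine ⟨hnd, List.nodup_singleton c, ?_⟩
        intro a ha b hb
        rw [List.mem_singleton] at hb
        subst hb
        exact fun hab => hcmem (hab ▸ ha)
      · intro p hp
        rw [PySem.Dict.items_insert_of_not_contains _ _ hgf] at hp
        rcases List.mem_append.1 hp with h | h
        · exact hne p h
        · simp only [List.mem_singleton] at h
          rw [h]
          simp

def pvBVal (p : String × List (List (String × Int))) : List (String × Int) :=
  if p.2.length = 1 then p.2.headD []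
  else (p.2.foldl (fun a v => v.foldl pvAccStep a) PySem.Dict.empty).items

theorem pvMergeA_eq_bval (p : String × List (List (String × Int))) (hne : p.2 ≠ []) :
    pvMergeA p.2 = pvBVal p := by
  by_cases hl : p.2.length = 1
  · obtain ⟨v, hv⟩ := List.length_eq_one_iff.1 hl
    simp only [pvBVal, hv, List.length_singleton, if_pos]
    rfl
  · obtain ⟨v1, vs, hcons⟩ := List.exists_cons_of_ne_nil hne
    have hvs : vs ≠ [] := by
      intro h
      rw [hcons, h] at hl
      simp at hl
    rw [pvBVal, if_neg hl, pvDouble, hcons, List.flatten_cons, pvMergeA_eq_acc vs hvs v1]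

theorem pvMain (ewf : List (String × String × List (String × Int))) :
    to_coarse_classes ewf = to_coarse_classes_alt ewf := by
  obtain ⟨h1, h2, h3⟩ := pvInv ewf PySem.Dict.empty PySem.Dict.empty rfl
    (by show List.Nodup ((PySem.Dict.empty : PySem.Dict String (List (List (String × Int)))).items.map (·.1)); simp [PySem.Dict.empty])
    (by intro p hp; simp [PySem.Dict.empty] at hp)
  show (ewf.foldl pvStepA PySem.Dict.empty).items
      = ((ewf.foldl pvStepB PySem.Dict.empty).items.foldl (fun r p =>
        if p.2.length = 1 then r.insert p.1 (p.2.headD [])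
        else r.insert p.1 ((p.2.foldl (fun a v => v.foldl pvAccStep a) PySem.Dict.empty).items))
      PySem.Dict.empty).items
  set g' := ewf.foldl pvStepB PySem.Dict.empty with hg'
  have hstep : (fun (r : PySem.Dict String (List (String × Int))) (p : String × List (List (String × Int))) =>
        if p.2.length = 1 then r.insert p.1 (p.2.headD [])
        else r.insert p.1 ((p.2.foldl (fun a v => v.foldl pvAccStep a) PySem.Dict.empty).items))
      = fun r p => r.insert p.1 (pvBVal p) := by
    funext r p
    by_cases h : p.2.length = 1 <;> simp [pvBVal, h]
  rw [hstep]
  rw [PySem.Dict.items_foldl_insert_fresh g'.items (·.1) pvBVal PySem.Dict.empty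
      (fun a _ => by simp [PySem.Dict.empty, PySem.Dict.contains])
      (by show List.Nodup g'.keys; exact h2)]
  rw [h1]
  show _ = (PySem.Dict.empty : PySem.Dict String (List (String × Int))).items ++ _
  rw [show (PySem.Dict.empty : PySem.Dict String (List (String × Int))).items = [] from rfl,
    List.nil_append]
  exact List.map_congr_left (fun p hp => by rw [pvF, pvMergeA_eq_bval p (h3 p hp)])

-- ===== VERDICT (by name: the statement is the Claim_ definition above) =====
theorem to_coarse_classes_spec : Claim_equal_to_coarse_classes := by
  unfold Claim_equal_to_coarse_classes
  intro ewf _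
  unfold Spec_to_coarse_classes
  exact pvMain ewf
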